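-- pv_equiv track=rewrite | github.com/BLPXSPG/PANACEA | api/search_model.py | create_contexts
-- ===== SOURCE A (Python) =====
-- def create_contexts(sent_list):
--     if len(sent_list) <= 1:
--         contexts = sent_list
--         return contexts
--
--     contexts = []
--     for n in range(len(sent_list)):
--         if n == 0:
--             contexts.append(sent_list[n]+' '+sent_list[n+1])
--         elif n == len(sent_list)-1:
--             contexts.append(sent_list[n-1]+' '+sent_list[n])
--         else:
--             contexts.append(sent_list[n-1]+' '+sent_list[n]+' '+sent_list[n+1])
--     return contexts
-- ===== SOURCE B (Python) =====
-- def create_contexts(sent_list):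
--     if len(sent_list) <= 1:
--         return sent_list
--     # staged passes: left[i] = sentence with its left neighbor prepended,
--     # ext[i] = right neighbor (with separator) or nothing at the end;
--     # the result is the elementwise concatenation of the two lists.
--     left = sent_list[:1] + [a + ' ' + b for a, b in zip(sent_list, sent_list[1:])]
--     ext = [' ' + b for b in sent_list[1:]] + ['']
--     return [l + e for l, e in zip(left, ext)]
-- ===== Notes on version B (the rewrite author's own statement) =====
-- stated objective: alternative
-- what changed: Replaces A's index loop with positional branches by three staged zip-of-shifted-lists passes: a 'left' list (each sentence with its left neighbor prepended), an 'ext' list (right neighbor or empty at the end), combined elementwise; no indices or branches remain.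
import Mathlib
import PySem

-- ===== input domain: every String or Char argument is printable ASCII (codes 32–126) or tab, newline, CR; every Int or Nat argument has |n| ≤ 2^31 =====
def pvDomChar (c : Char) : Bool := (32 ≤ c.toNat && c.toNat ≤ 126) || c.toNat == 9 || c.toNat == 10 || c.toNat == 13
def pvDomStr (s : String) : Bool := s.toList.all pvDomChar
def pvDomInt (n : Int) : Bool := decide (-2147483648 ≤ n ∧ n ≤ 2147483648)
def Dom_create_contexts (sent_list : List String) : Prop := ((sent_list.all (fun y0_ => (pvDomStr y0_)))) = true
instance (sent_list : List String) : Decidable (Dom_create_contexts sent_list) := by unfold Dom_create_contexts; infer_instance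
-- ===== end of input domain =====

-- B replaces A's index loop with positional branches by staged zip-of-shifted-lists passes combined elementwise (objective: alternative).

-- ===== PORT A =====
-- indices n-1, n, n+1 used by A are always in range on the branch that uses them, so pyGetD's default is never taken
def create_contexts (sent_list : List String) : List String :=
  if sent_list.length ≤ 1 then
    sent_list
  else
    (PySem.List.pyRange 0 (sent_list.length : Int) 1).foldl
      (fun contexts n =>
        if n = 0 then
          contexts ++ [PySem.List.pyGetD sent_list n "" ++ " " ++ PySem.List.pyGetD sent_list (n + 1) ""]
        else if n = (sent_list.length : Int) - 1 then
          contexts ++ [PySem.List.pyGetD sent_list (n - 1) "" ++ " " ++ PySem.List.pyGetD sent_list n ""]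
        else
          contexts ++ [PySem.List.pyGetD sent_list (n - 1) "" ++ " " ++ PySem.List.pyGetD sent_list n "" ++ " " ++ PySem.List.pyGetD sent_list (n + 1) ""])
      []

-- ===== PORT B =====
-- zip truncates like Python's zip; sent_list[:1] and sent_list[1:] are PySem slices
def create_contexts_alt (sent_list : List String) : List String :=
  if sent_list.length ≤ 1 then
    sent_list
  else
    let left := PySem.List.slice sent_list none (some 1) ++
      (sent_list.zip (PySem.List.slice sent_list (some 1) none)).map (fun p => p.1 ++ " " ++ p.2)
    let ext := (PySem.List.slice sent_list (some 1) none).map (fun b => " " ++ b) ++ [""]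
    (left.zip ext).map (fun p => p.1 ++ p.2)

-- ===== PRECONDITION & SPEC =====
def Spec_create_contexts (sent_list : List String) (out : List String) : Prop := out = create_contexts_alt sent_list
instance (sent_list : List String) (out : List String) : Decidable (Spec_create_contexts sent_list out) := by unfold Spec_create_contexts; infer_instance

-- ===== CLAIM (what is proved, stated in full; the proofs are below) =====
def Claim_equal_create_contexts : Prop := ∀ (sent_list : List String), Dom_create_contexts sent_list → Spec_create_contexts sent_list (create_contexts sent_list)

-- ===== LEMMAS AND PROOFS =====

-- pyGetD with an in-range natural index is getElem
theorem pv_getD (xs : List String) (i : Nat) (h : i < xs.length) :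
    PySem.List.pyGetD xs ((i : Nat) : Int) "" = xs[i] := by
  rw [PySem.List.pyGetD_natCast, List.getD_eq_getElem?_getD, List.getElem?_eq_getElem h]
  rfl

theorem pv_foldl_branches {a b : Type} (P Q : b → Prop) [DecidablePred P] [DecidablePred Q]
    (A B C : b → a) (l : List b) (acc : List a) :
    List.foldl (fun x y => if P y then x ++ [A y] else if Q y then x ++ [B y] else x ++ [C y]) acc l
      = acc ++ l.map (fun y => if P y then A y else if Q y then B y else C y) := by
  induction l generalizing acc with
  | nil => simp
  | cons z l ih => simp only [List.foldl_cons, List.map_cons, ih]; split_ifs <;> simp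

-- ===== VERDICT (by name: the statement is the Claim_ definition above) =====
theorem create_contexts_spec : Claim_equal_create_contexts := by
  intro xs _
  unfold Spec_create_contexts create_contexts create_contexts_alt
  split_ifs with h
  · rfl
  · have h2 : 2 ≤ xs.length := by omega
    rw [PySem.List.pyRange_zero_natCast, List.foldl_map]
    rw [pv_foldl_branches (fun k : Nat => ((k : Nat) : Int) = 0)
        (fun k : Nat => ((k : Nat) : Int) = (xs.length : Int) - 1)
        (fun k : Nat => PySem.List.pyGetD xs ((k : Nat) : Int) "" ++ " " ++ PySem.List.pyGetD xs (((k : Nat) : Int) + 1) "")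
        (fun k : Nat => PySem.List.pyGetD xs (((k : Nat) : Int) - 1) "" ++ " " ++ PySem.List.pyGetD xs ((k : Nat) : Int) "")
        (fun k : Nat => PySem.List.pyGetD xs (((k : Nat) : Int) - 1) "" ++ " " ++ PySem.List.pyGetD xs ((k : Nat) : Int) "" ++ " " ++ PySem.List.pyGetD xs (((k : Nat) : Int) + 1) "")
        (List.range xs.length) [], List.nil_append]
    show _ = List.map (fun p => p.1 ++ p.2)
        ((PySem.List.slice xs none (some 1) ++
            (xs.zip (PySem.List.slice xs (some 1) none)).map (fun p => p.1 ++ " " ++ p.2)).zip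
          ((PySem.List.slice xs (some 1) none).map (fun b => " " ++ b) ++ [""]))
    have hs : PySem.List.slice xs none (some (1:Int)) = xs.take 1 := by
      rw [show (1:Int) = ((1:Nat):Int) by norm_num, PySem.List.slice_to_natCast]
    rw [PySem.List.slice_from_one, hs, ← List.drop_one]
    apply List.ext_getElem
    · simp only [List.length_map, List.length_zip, List.length_append, List.length_take,
        List.length_drop, List.length_range, List.length_cons, List.length_nil, Nat.min_def]
      split_ifs <;> omega
    · intro i hi hi'
      have hin : i < xs.length := by simpa using hi
      have hlen1 : (xs.take 1).length = 1 := by simp; omega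
      rw [List.getElem_map, List.getElem_map, List.getElem_zip, List.getElem_range]
      by_cases hi0 : i = 0
      · subst hi0
        rw [if_pos (by norm_num)]
        rw [List.getElem_append_left (by omega), List.getElem_append_left (by simp; omega)]
        rw [List.getElem_take, List.getElem_map, List.getElem_drop]
        rw [show ((0 : Nat) : Int) + 1 = ((1 : Nat) : Int) from rfl,
            pv_getD xs 0 (by omega), pv_getD xs 1 (by omega)]
        simp [String.append_assoc]
      · have h1i : 1 ≤ i := Nat.one_le_iff_ne_zero.mpr hi0
        have hne0 : ((i : Nat) : Int) ≠ 0 := by omega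
        rw [if_neg hne0]
        have hsub : ((i : Nat) : Int) - 1 = ((i - 1 : Nat) : Int) := by omega
        rw [List.getElem_append_right (by omega)]
        simp only [List.getElem_map, List.getElem_zip, List.getElem_drop, hlen1]
        have hleft : xs[i - 1] ++ " " ++ xs[1 + (i - 1)] = xs[i - 1] ++ " " ++ xs[i] := by
          congr 2
          omega
        by_cases hlast : i = xs.length - 1
        · have hc : ((i : Nat) : Int) = (xs.length : Int) - 1 := by omega
          rw [if_pos hc]
          rw [List.getElem_append_right (by simp; omega)]
          rw [hsub, pv_getD xs (i - 1) (by omega), pv_getD xs i hin]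
          simp [hleft]
        · have hc : ((i : Nat) : Int) ≠ (xs.length : Int) - 1 := by omega
          have hlt : i < xs.length - 1 := by omega
          rw [if_neg hc]
          rw [List.getElem_append_left (by simp; omega)]
          rw [List.getElem_map, List.getElem_drop]
          rw [hsub, show ((i : Nat) : Int) + 1 = ((i + 1 : Nat) : Int) by omega,
              pv_getD xs (i - 1) (by omega), pv_getD xs i hin, pv_getD xs (i + 1) (by omega)]
          rw [hleft]
          have : xs[1 + i] = xs[i + 1] := by congr 1; omega
          rw [this, String.append_assoc]
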